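-- pv_equiv track=rewrite | github.com/yaoshun/TopCoder | SRM684Div1/250/solution.py | maxsize
-- ===== SOURCE A (Python) =====
-- def maxsize(a, k):
--     a = list(a)
--     a.sort()
--     n = len(a)
--     ans = 1
--     for i in range(n):
--         for j in range(i + 1, n):
--             last = a[i]
--             rlen = a[j] - a[i]
--             count = 2
--
--             for m in range(i + 1, j):
--                 if (a[m] - last) * k >= rlen and (a[j] - a[m]) * k >= rlen:
--                     last = a[m]
--                     count += 1
--             ans = max(ans, count)
--     return ans
-- ===== SOURCE B (Python) =====
-- def _bisect_left(a, x, lo, hi):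
--     # first index q in [lo, hi) with a[q] >= x, else hi (hand-rolled: A imports no modules)
--     while lo < hi:
--         mid = (lo + hi) // 2
--         if a[mid] < x:
--             lo = mid + 1
--         else:
--             hi = mid
--     return lo
--
--
-- def maxsize(a, k):
--     a = sorted(a)
--     n = len(a)
--     ans = 1
--     for i in range(n):
--         for j in range(i + 1, n):
--             r = a[j] - a[i]
--             if k <= 0:
--                 # gaps are >= 0, so gap*k >= r is possible only when r == 0,
--                 # and then every middle element qualifies
--                 c = j - i + 1 if r == 0 else 2
--             else:
--                 need = -((-r) // k)          # ceil(r / k): gap*k >= r  <=>  gap >= need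
--                 hi_val = a[j] - need
--                 c = 2
--                 last = a[i]
--                 p = i + 1
--                 while True:
--                     q = _bisect_left(a, last + need, p, j)
--                     if q < j and a[q] <= hi_val:
--                         last = a[q]
--                         c += 1
--                         p = q + 1
--                     else:
--                         break
--             ans = max(ans, c)
--     return ans
-- ===== Notes on version B (the rewrite author's own statement) =====
-- stated objective: alternative
-- what changed: Replaces A's per-pair linear greedy scan by a closed-form count for k <= 0 (only a zero span can satisfy gap*k >= span) and, for k > 0, by a chain of hand-written binary-search jumps to the next element reachable with gap >= ceil(span/k), stopping as soon as the right-hand bound fails.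
import Mathlib
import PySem

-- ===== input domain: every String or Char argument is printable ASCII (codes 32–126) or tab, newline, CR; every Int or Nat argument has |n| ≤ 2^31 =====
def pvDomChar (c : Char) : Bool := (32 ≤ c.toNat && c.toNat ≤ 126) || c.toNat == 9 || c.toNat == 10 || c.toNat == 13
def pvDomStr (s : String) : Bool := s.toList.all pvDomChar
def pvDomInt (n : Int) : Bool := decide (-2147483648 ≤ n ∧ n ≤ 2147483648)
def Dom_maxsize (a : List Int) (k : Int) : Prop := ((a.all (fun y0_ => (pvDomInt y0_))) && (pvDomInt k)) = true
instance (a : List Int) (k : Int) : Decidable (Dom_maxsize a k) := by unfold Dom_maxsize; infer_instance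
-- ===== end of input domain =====

-- B replaces A's linear inner scan by a closed form for k ≤ 0 and, for k > 0, by a
-- chain of binary-search jumps to the next admissible element (alternative algorithm;
-- no speed claim). Equivalence is proved for the return value; A sorts a local copy only.

-- ===== PORT A =====
def maxsize (a : List Int) (k : Int) : Int :=
  let s := PySem.List.sorted a (fun x => x)
  let n := s.length
  (List.range n).foldl (fun ans i =>
    (List.range' (i + 1) (n - (i + 1))).foldl (fun ans j =>
      let rlen := s.getD j 0 - s.getD i 0
      let st := (List.range' (i + 1) (j - (i + 1))).foldl
        (fun (st : Int × Int) m =>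
          if (s.getD m 0 - st.1) * k ≥ rlen ∧ (s.getD j 0 - s.getD m 0) * k ≥ rlen
          then (s.getD m 0, st.2 + 1) else st)
        (s.getD i 0, 2)
      max ans st.2) ans) 1

-- ===== PORT B =====
-- Source B's hand-written _bisect_left(a, x, lo, hi): first q in [lo,hi) with a[q] ≥ x, else hi.
-- The fuel argument (hi - lo at the call site) only makes the recursion structural.
def bisectSeg (s : List Int) (x : Int) : Nat → Nat → Nat → Nat
  | 0, lo, _ => lo
  | fuel + 1, lo, hi =>
    if lo < hi then
      let mid := (lo + hi) / 2
      if s.getD mid 0 < x then bisectSeg s x fuel (mid + 1) hi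
      else bisectSeg s x fuel lo mid
    else lo

-- Source B's while-True jump loop for one pair (i, j), k > 0 (fuel = totality guard only)
def jumpChain (s : List Int) (need hiVal : Int) (j : Nat) : Nat → Nat → Int → Int → Int
  | 0, _, _, c => c
  | fuel + 1, p, last, c =>
    let q := bisectSeg s (last + need) (j - p) p j
    if q < j ∧ s.getD q 0 ≤ hiVal then
      jumpChain s need hiVal j fuel (q + 1) (s.getD q 0) (c + 1)
    else c

def maxsize_alt (a : List Int) (k : Int) : Int :=
  let s := PySem.List.sorted a (fun x => x)
  let n := s.length
  (List.range n).foldl (fun ans i =>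
    (List.range' (i + 1) (n - (i + 1))).foldl (fun ans j =>
      let r := s.getD j 0 - s.getD i 0
      let c : Int :=
        if k ≤ 0 then (if r = 0 then (j : Int) - (i : Int) + 1 else 2)
        else
          let need := -(PySem.Int.floordiv (-r) k)
          jumpChain s need (s.getD j 0 - need) j (j - i) (i + 1) (s.getD i 0) 2
      max ans c) ans) 1

-- ===== PRECONDITION & SPEC =====
def Spec_maxsize (a : List Int) (k : Int) (out : Int) : Prop := out = maxsize_alt a k
instance (a : List Int) (k : Int) (out : Int) : Decidable (Spec_maxsize a k out) := by unfold Spec_maxsize; infer_instance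

-- ===== CLAIM (what is proved, stated in full; the proofs are below) =====
def Claim_equal_maxsize : Prop := ∀ (a : List Int) (k : Int), Dom_maxsize a k → Spec_maxsize a k (maxsize a k)

-- ===== LEMMAS AND PROOFS =====

theorem foldl_fixed {α β : Type} (l : List α) (f : β → α → β) (st : β)
    (h : ∀ x ∈ l, f st x = st) : l.foldl f st = st := by
  induction l with
  | nil => rfl
  | cons y ys ih =>
    simp only [List.foldl_cons, h y (by simp)]
    exact ih (fun x hx => h x (by simp [hx]))

theorem foldl_id_of_mem {α β : Type} (l : List α) (f : β → α → β) (st : β)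
    (h : ∀ x ∈ l, ∀ b, f b x = b) : l.foldl f st = st := by
  induction l generalizing st with
  | nil => rfl
  | cons y ys ih =>
    simp only [List.foldl_cons, h y (by simp)]
    exact ih st (fun x hx b => h x (by simp [hx]) b)

theorem getD_mono (s : List Int) (hs : s.Pairwise (· ≤ ·)) (p q : Nat)
    (hpq : p ≤ q) (hq : q < s.length) : s.getD p 0 ≤ s.getD q 0 := by
  rcases Nat.lt_or_ge p q with h | h
  · have := (List.pairwise_iff_getElem.mp hs) p q (by omega) hq h
    rwa [List.getD_eq_getElem s 0 (by omega), List.getD_eq_getElem s 0 hq]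
  · have : p = q := by omega
    subst this; rfl

theorem ceil_bracket (r k : Int) (hk : 0 < k) :
    ∀ t : Int, r ≤ t * k ↔ -(PySem.Int.floordiv (-r) k) ≤ t := by
  intro t
  have h := (PySem.Int.neg_floordiv_neg_eq_iff_of_pos (a := r) (b := k)
      (q := -(PySem.Int.floordiv (-r) k)) hk).mp rfl
  constructor
  · intro hrt
    by_contra hlt
    push Not at hlt
    have ht : t ≤ -(PySem.Int.floordiv (-r) k) - 1 := by omega
    nlinarith [h.1, mul_le_mul_of_nonneg_right ht (le_of_lt hk)]
  · intro hle
    nlinarith [h.2, mul_le_mul_of_nonneg_right hle (le_of_lt hk)]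

theorem bisectSeg_spec (s : List Int) (hs : s.Pairwise (· ≤ ·)) (x : Int) :
    ∀ fuel lo hi, hi - lo ≤ fuel → lo ≤ hi → hi ≤ s.length →
      lo ≤ bisectSeg s x fuel lo hi ∧ bisectSeg s x fuel lo hi ≤ hi ∧
      (∀ m, lo ≤ m → m < bisectSeg s x fuel lo hi → s.getD m 0 < x) ∧
      (bisectSeg s x fuel lo hi < hi → x ≤ s.getD (bisectSeg s x fuel lo hi) 0) := by
  intro fuel
  induction fuel with
  | zero =>
    intro lo hi hf hle hlen
    simp only [bisectSeg]
    exact ⟨le_refl _, by omega, fun m hm hmq => by omega, fun hq => by omega⟩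
  | succ fuel ihf =>
    intro lo hi hf hle hlen
    simp only [bisectSeg]
    by_cases h : lo < hi
    · rw [if_pos h]
      have hmid : lo ≤ (lo + hi) / 2 ∧ (lo + hi) / 2 < hi := by omega
      by_cases hlt : s.getD ((lo + hi) / 2) 0 < x
      · rw [if_pos hlt]
        obtain ⟨i1, i2, i3, i4⟩ := ihf ((lo + hi) / 2 + 1) hi (by omega) (by omega) hlen
        refine ⟨by omega, i2, ?_, i4⟩
        intro m hm hmq
        rcases Nat.lt_or_ge m ((lo + hi) / 2 + 1) with hcase | hcase
        · exact lt_of_le_of_lt (getD_mono s hs m ((lo + hi) / 2) (by omega) (by omega)) hlt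
        · exact i3 m hcase hmq
      · rw [if_neg hlt]
        obtain ⟨i1, i2, i3, i4⟩ := ihf lo ((lo + hi) / 2) (by omega) (by omega) (by omega)
        push Not at hlt
        refine ⟨i1, by omega, i3, ?_⟩
        intro hq
        rcases Nat.lt_or_ge (bisectSeg s x fuel lo ((lo + hi) / 2)) ((lo + hi) / 2) with hc | hc
        · exact i4 hc
        · have : bisectSeg s x fuel lo ((lo + hi) / 2) = (lo + hi) / 2 := by omega
          rw [this]; exact hlt
    · rw [if_neg h]
      exact ⟨le_refl _, by omega, fun m hm hmq => by omega, fun hq => by omega⟩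

-- the k > 0 case: A's greedy scan over [p, j) equals B's binary-search jumping
theorem jump_eq (s : List Int) (hs : s.Pairwise (· ≤ ·)) (k r need : Int) (hk : 0 < k)
    (hiff : ∀ t : Int, r ≤ t * k ↔ need ≤ t) (j : Nat) (hj : j < s.length) :
    ∀ fuel p last c, j - p < fuel → p ≤ j →
      ((List.range' p (j - p)).foldl
        (fun (st : Int × Int) m =>
          if (s.getD m 0 - st.1) * k ≥ r ∧ (s.getD j 0 - s.getD m 0) * k ≥ r
          then (s.getD m 0, st.2 + 1) else st)
        (last, c)).2
      = jumpChain s need (s.getD j 0 - need) j fuel p last c := by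
  intro fuel
  induction fuel with
  | zero => intro p last c hn _; omega
  | succ fuel ih =>
    intro p last c hn hpj
    obtain ⟨q1, q2, q3, q4⟩ :=
      bisectSeg_spec s hs (last + need) (j - p) p j (le_refl _) hpj (by omega)
    set q := bisectSeg s (last + need) (j - p) p j with hqdef
    simp only [jumpChain]
    have hsplit : List.range' p (j - p) = List.range' p (q - p) ++ List.range' q (j - q) := by
      have h := List.range'_append (s := p) (m := q - p) (n := j - q) (step := 1)
      rw [show p + 1 * (q - p) = q from by omega] at h
      rw [show q - p + (j - q) = j - p from by omega] at h
      exact h.symm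
    rw [hsplit, List.foldl_append]
    have hpre : (List.range' p (q - p)).foldl
        (fun (st : Int × Int) m =>
          if (s.getD m 0 - st.1) * k ≥ r ∧ (s.getD j 0 - s.getD m 0) * k ≥ r
          then (s.getD m 0, st.2 + 1) else st) (last, c) = (last, c) := by
      -- all elements of range' p (q-p) fail the first condition; state stays (last, c)
      apply foldl_fixed
      intro m hm
      have hmr : p ≤ m ∧ m < q := by
        have := List.mem_range'_1.mp hm
        omega
      have hlt := q3 m hmr.1 hmr.2
      have hc1 : ¬ ((s.getD m 0 - last) * k ≥ r ∧ (s.getD j 0 - s.getD m 0) * k ≥ r) := by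
        rintro ⟨h1, _⟩
        rw [ge_iff_le, hiff] at h1
        omega
      simp only [if_neg hc1]
    rw [hpre]
    by_cases hqj : q < j
    · by_cases hhi : s.getD q 0 ≤ s.getD j 0 - need
      · -- q is accepted: A takes it too, then recurse
        rw [if_pos ⟨hqj, hhi⟩]
        have hcons : List.range' q (j - q) = q :: List.range' (q + 1) (j - (q + 1)) := by
          rw [show j - q = (j - (q+1)) + 1 by omega, List.range'_succ]
        rw [hcons, List.foldl_cons]
        have hc1 : (s.getD q 0 - last) * k ≥ r := by
          rw [ge_iff_le, hiff]; have := q4 hqj; omega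
        have hc2 : (s.getD j 0 - s.getD q 0) * k ≥ r := by
          rw [ge_iff_le, hiff]; omega
        rw [if_pos ⟨hc1, hc2⟩]
        exact ih (q + 1) (s.getD q 0) (c + 1) (by omega) (by omega)
      · -- q too big on the right: A skips everything from q on
        rw [if_neg (by intro hcon; exact hhi hcon.2)]
        have hid := foldl_id_of_mem (List.range' q (j - q))
          (fun (st : Int × Int) m =>
            if (s.getD m 0 - st.1) * k ≥ r ∧ (s.getD j 0 - s.getD m 0) * k ≥ r
            then (s.getD m 0, st.2 + 1) else st) (last, c) ?_
        · rw [hid]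
        · intro m hm b
          have hmr : q ≤ m ∧ m < j := by
            have := List.mem_range'_1.mp hm; omega
          have hmono := getD_mono s hs q m hmr.1 (by omega)
          have hc2 : ¬ ((s.getD m 0 - b.1) * k ≥ r ∧ (s.getD j 0 - s.getD m 0) * k ≥ r) := by
            rintro ⟨_, h2⟩
            rw [ge_iff_le, hiff] at h2
            omega
          simp only [if_neg hc2]
    · -- q = j: nothing found, both stop
      have hq : q = j := by omega
      rw [if_neg (by omega), hq]
      simp

-- the k ≤ 0 case with equal endpoints: every middle element is taken
theorem fold_all_equal (s : List Int) (k v : Int) (j : Nat) (hvj : s.getD j 0 = v) (hk : k ≤ 0) :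
    ∀ len p c, (∀ m, p ≤ m → m < p + len → s.getD m 0 = v) →
      ((List.range' p len).foldl
        (fun (st : Int × Int) m =>
          if (s.getD m 0 - st.1) * k ≥ 0 ∧ (s.getD j 0 - s.getD m 0) * k ≥ 0
          then (s.getD m 0, st.2 + 1) else st)
        (v, c)) = (v, c + len) := by
  intro len
  induction len with
  | zero => intro p c _; simp
  | succ len ihl =>
    intro p c hall
    rw [List.range'_succ, List.foldl_cons]
    have hp : s.getD p 0 = v := hall p (le_refl _) (by omega)
    rw [if_pos (by rw [hp, hvj]; simp), hp]
    have := ihl (p + 1) (c + 1) (fun m hm1 hm2 => hall m (by omega) (by omega))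
    rw [this]
    simp only [Prod.mk.injEq]
    refine ⟨by trivial, by push_cast; ring⟩

-- per-pair equality of the two inner computations
theorem pair_eq (s : List Int) (hs : s.Pairwise (· ≤ ·)) (k : Int) (i j : Nat)
    (hij : i < j) (hj : j < s.length) :
    ((List.range' (i + 1) (j - (i + 1))).foldl
        (fun (st : Int × Int) m =>
          if (s.getD m 0 - st.1) * k ≥ (s.getD j 0 - s.getD i 0) ∧
             (s.getD j 0 - s.getD m 0) * k ≥ (s.getD j 0 - s.getD i 0)
          then (s.getD m 0, st.2 + 1) else st)
        (s.getD i 0, 2)).2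
    = (if k ≤ 0 then (if s.getD j 0 - s.getD i 0 = 0 then (j : Int) - (i : Int) + 1 else 2)
       else
         jumpChain s (-(PySem.Int.floordiv (-(s.getD j 0 - s.getD i 0)) k))
           (s.getD j 0 - -(PySem.Int.floordiv (-(s.getD j 0 - s.getD i 0)) k))
           j (j - i) (i + 1) (s.getD i 0) 2) := by
  have hr0 : 0 ≤ s.getD j 0 - s.getD i 0 := by
    have := getD_mono s hs i j (by omega) hj; omega
  by_cases hk : k ≤ 0
  · rw [if_pos hk]
    by_cases hr : s.getD j 0 - s.getD i 0 = 0
    · rw [if_pos hr]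
      have hv : s.getD i 0 = s.getD j 0 := by omega
      have hall : ∀ m, i + 1 ≤ m → m < (i + 1) + (j - (i + 1)) → s.getD m 0 = s.getD i 0 := by
        intro m h1 h2
        have l1 := getD_mono s hs i m (by omega) (by omega)
        have l2 := getD_mono s hs m j (by omega) hj
        omega
      have := fold_all_equal s k (s.getD i 0) j hv.symm hk (j - (i + 1)) (i + 1) 2 hall
      rw [hr]
      rw [this]
      simp only
      push_cast [show (i : Int) + 1 ≤ j from by exact_mod_cast Nat.succ_le_of_lt hij]
      omega
    · rw [if_neg hr]
      have hid := foldl_id_of_mem (List.range' (i + 1) (j - (i + 1)))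
        (fun (st : Int × Int) m =>
          if (s.getD m 0 - st.1) * k ≥ (s.getD j 0 - s.getD i 0) ∧
             (s.getD j 0 - s.getD m 0) * k ≥ (s.getD j 0 - s.getD i 0)
          then (s.getD m 0, st.2 + 1) else st) (s.getD i 0, 2) ?_
      · rw [hid]
      intro m hm b
      have hmr := List.mem_range'_1.mp hm
      have hmi : s.getD i 0 ≤ s.getD m 0 := getD_mono s hs i m (by omega) (by omega)
      have hmj : s.getD m 0 ≤ s.getD j 0 := getD_mono s hs m j (by omega) hj
      have hc2 : ¬ ((s.getD m 0 - b.1) * k ≥ s.getD j 0 - s.getD i 0 ∧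
          (s.getD j 0 - s.getD m 0) * k ≥ s.getD j 0 - s.getD i 0) := by
        rintro ⟨_, h2⟩
        have hprod : (s.getD j 0 - s.getD m 0) * k ≤ 0 :=
          mul_nonpos_of_nonneg_of_nonpos (by omega) hk
        omega
      simp only [if_neg hc2]
  · push Not at hk
    rw [if_neg (by omega)]
    exact jump_eq s hs k (s.getD j 0 - s.getD i 0)
      (-(PySem.Int.floordiv (-(s.getD j 0 - s.getD i 0)) k)) hk
      (ceil_bracket (s.getD j 0 - s.getD i 0) k hk) j hj
      (j - i) (i + 1) (s.getD i 0) 2 (by omega) (by omega)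

-- ===== VERDICT (by name: the statement is the Claim_ definition above) =====
theorem maxsize_spec : Claim_equal_maxsize := by
  intro a k _
  unfold Spec_maxsize maxsize maxsize_alt
  simp only
  have hs : (PySem.List.sorted a (fun x => x)).Pairwise (· ≤ ·) :=
    PySem.List.sorted_pairwise a (fun x => x)
  set s := PySem.List.sorted a (fun x => x) with hsdef
  apply PySem.List.foldl_congr_mem
  intro ans i hi
  have hi' : i < s.length := List.mem_range.mp hi
  apply PySem.List.foldl_congr_mem
  intro ans' j hjmem
  have hj' := List.mem_range'_1.mp hjmem
  have := pair_eq s hs k i j (by omega) (by omega)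
  simp only at this ⊢
  rw [this]
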